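-- pv_equiv track=rewrite | github.com/bexxx/commodore64 | getting-started/5 RasterBars/rastercolors.py | build_bumped
-- ===== SOURCE A (Python) =====
-- def build_bumped(gradient):
--  ret = []
--  rret = []
--  for i in range(0, len(gradient)-1):
--   tmp = []
--   if i==0:
--    tmp.append(gradient[0])
--   elif i==1:
--    tmp.append(gradient[1])
--    tmp.append(gradient[0])
--   elif i<len(gradient)-1:
--    tmp.append(gradient[i+1])
--    for j in range(0, i-1):
--     tmp.append(gradient[i])
--    tmp.append(gradient[i-1])
--   tmp.append(0)
--   for i in range(0, len(tmp)):
--     ret.append(tmp[i])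
--     rret.insert(0, tmp[len(tmp)-1-i])
--  tmp = []
--  tmp.append(gradient[-2])
--  for j in range(0, len(gradient)):
--   tmp.append(gradient[-1])
--  tmp.append(0)
--  return ret + tmp + rret
-- ===== SOURCE B (Python) =====
-- def build_bumped(gradient):
--     # Recursive inside-out construction: each layer i wraps the inner sequence
--     # with its bump block on BOTH sides, so no reversal/mirroring pass is needed.
--     n = len(gradient)
--
--     def layer(i):
--         if i >= n - 1:
--             return [gradient[-2]] + [gradient[-1]] * n + [0]
--         b = ([gradient[i + 1] if i >= 2 else gradient[i]]
--              + [gradient[i]] * (i - 1)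
--              + ([gradient[i - 1]] if i >= 1 else [])
--              + [0])
--         return b + layer(i + 1) + b
--
--     return layer(0)
-- ===== Notes on version B (the rewrite author's own statement) =====
-- stated objective: alternative
-- what changed: B replaces A's iterative twin-accumulator mirroring (ret appended right, rret built by insert(0)) with a recursive inside-out construction: layer(i) wraps the recursively built inner sequence with block i on both sides, so there is no second accumulator and no reversal pass; the block itself is built branch-free from repetition counts instead of A's three-way if.
import Mathlib
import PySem

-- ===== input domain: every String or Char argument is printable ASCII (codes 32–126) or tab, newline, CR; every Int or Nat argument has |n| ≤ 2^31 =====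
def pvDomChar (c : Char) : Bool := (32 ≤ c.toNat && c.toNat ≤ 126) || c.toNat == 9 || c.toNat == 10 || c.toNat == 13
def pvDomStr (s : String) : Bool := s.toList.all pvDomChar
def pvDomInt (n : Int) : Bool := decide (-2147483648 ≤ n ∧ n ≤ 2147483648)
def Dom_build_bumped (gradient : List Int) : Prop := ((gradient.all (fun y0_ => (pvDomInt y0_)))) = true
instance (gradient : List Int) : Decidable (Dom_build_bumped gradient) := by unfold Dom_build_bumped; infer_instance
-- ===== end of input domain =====

-- B replaces A's iterative twin-accumulator mirroring with a recursive inside-out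
-- construction: each layer wraps the inner sequence with its block on both sides
-- (objective: alternative decomposition, no rret/insert(0) mirroring pass).

-- ===== PORT A =====
def build_bumped (gradient : List Int) : List Int :=
  let n : Int := gradient.length
  let st :=
    (PySem.List.pyRange 0 (n - 1) 1).foldl
      (fun (st : List Int × List Int) (i : Int) =>
        let tmp : List Int :=
          if i = 0 then [PySem.List.pyGetD gradient 0 0]
          else if i = 1 then
            [PySem.List.pyGetD gradient 1 0, PySem.List.pyGetD gradient 0 0]
          else if i < n - 1 then
            let t0 := [PySem.List.pyGetD gradient (i + 1) 0]
            let t1 := (PySem.List.pyRange 0 (i - 1) 1).foldl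
              (fun t _ => t ++ [PySem.List.pyGetD gradient i 0]) t0
            t1 ++ [PySem.List.pyGetD gradient (i - 1) 0]
          else []
        let tmp := tmp ++ [0]
        (PySem.List.pyRange 0 (tmp.length : Int) 1).foldl
          (fun (st2 : List Int × List Int) (i2 : Int) =>
            (st2.1 ++ [PySem.List.pyGetD tmp i2 0],
             PySem.List.pyGetD tmp ((tmp.length : Int) - 1 - i2) 0 :: st2.2)) st)
      ([], [])
  let t0 := [PySem.List.pyGetD gradient (-2) 0]
  let t1 := (PySem.List.pyRange 0 n 1).foldl
    (fun t _ => t ++ [PySem.List.pyGetD gradient (-1) 0]) t0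
  let tmp := t1 ++ [0]
  st.1 ++ tmp ++ st.2

-- ===== PORT B =====
-- Source B's block expression: head + [g[i]]*(i-1) + optional tail + [0]
def bumpLayerBlock (gradient : List Int) (i : Int) : List Int :=
  [if 2 ≤ i then PySem.List.pyGetD gradient (i + 1) 0 else PySem.List.pyGetD gradient i 0]
    ++ List.replicate (i - 1).toNat (PySem.List.pyGetD gradient i 0)
    ++ (if 1 ≤ i then [PySem.List.pyGetD gradient (i - 1) 0] else [])
    ++ [0]

-- Source B's recursive layer(i); the Nat argument is the remaining depth (n-1-i),
-- a transcription of the `i >= n - 1` stopping test.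
def bumpLayer (gradient : List Int) (n : Int) (i : Int) : Nat → List Int
  | 0 =>
      [PySem.List.pyGetD gradient (-2) 0]
        ++ List.replicate n.toNat (PySem.List.pyGetD gradient (-1) 0) ++ [0]
  | k + 1 =>
      let b := bumpLayerBlock gradient i
      b ++ bumpLayer gradient n (i + 1) k ++ b

def build_bumped_alt (gradient : List Int) : List Int :=
  let n : Int := gradient.length
  bumpLayer gradient n 0 (n - 1).toNat

-- ===== PRECONDITION & SPEC =====
-- Pre_: A (and B) raise IndexError at gradient[-2] when the list has fewer than 2 elements.
def Pre_build_bumped (gradient : List Int) : Prop := 2 ≤ gradient.length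
instance (gradient : List Int) : Decidable (Pre_build_bumped gradient) := by
  unfold Pre_build_bumped; infer_instance
def pvWitness_build_bumped : List Int := [1, 2, 3]

def Spec_build_bumped (gradient : List Int) (out : List Int) : Prop := out = build_bumped_alt gradient
instance (gradient : List Int) (out : List Int) : Decidable (Spec_build_bumped gradient out) := by unfold Spec_build_bumped; infer_instance

-- ===== CLAIM (what is proved, stated in full; the proofs are below) =====
def Claim_equal_build_bumped : Prop := ∀ (gradient : List Int), Dom_build_bumped gradient → Pre_build_bumped gradient → Spec_build_bumped gradient (build_bumped gradient)

-- ===== LEMMAS AND PROOFS =====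

-- `tmp.append(c)` repeated once per element of l: a replicate.
theorem foldl_append_const (c : Int) (l : List Int) (t : List Int) :
    l.foldl (fun t _ => t ++ [c]) t = t ++ List.replicate l.length c := by
  induction l generalizing t with
  | nil => simp
  | cons x xs ih =>
    simp [List.foldl_cons, ih]
    rw [List.replicate_succ]

-- A's inner mirroring loop over range(len(tmp)): appends tmp to ret, prepends tmp (in order) to rret.
theorem inner_loop_eq (tmp r rr : List Int) :
    (PySem.List.pyRange 0 (tmp.length : Int) 1).foldl
      (fun (st2 : List Int × List Int) (i2 : Int) =>
        (st2.1 ++ [PySem.List.pyGetD tmp i2 0],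
         PySem.List.pyGetD tmp ((tmp.length : Int) - 1 - i2) 0 :: st2.2)) (r, rr)
      = (r ++ tmp, tmp ++ rr) := by
  have key : ∀ k : Nat, k ≤ tmp.length →
      (PySem.List.pyRange 0 (k : Int) 1).foldl
        (fun (st2 : List Int × List Int) (i2 : Int) =>
          (st2.1 ++ [PySem.List.pyGetD tmp i2 0],
           PySem.List.pyGetD tmp ((tmp.length : Int) - 1 - i2) 0 :: st2.2)) (r, rr)
        = (r ++ tmp.take k, tmp.drop (tmp.length - k) ++ rr) := by
    intro k hk
    induction k with
    | zero => simp
    | succ k ih =>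
      have hk' : k ≤ tmp.length := Nat.le_of_succ_le hk
      have hklt : k < tmp.length := hk
      have hcast : ((k : Int) + 1) = ((k + 1 : Nat) : Int) := by push_cast; ring
      have hstep : PySem.List.pyRange 0 ((k + 1 : Nat) : Int) 1
          = PySem.List.pyRange 0 (k : Int) 1 ++ [(k : Int)] := by
        rw [← hcast, PySem.List.pyRange_one_succ_right (by exact_mod_cast Nat.zero_le k)]
      rw [hstep, List.foldl_append, ih hk']
      simp only [List.foldl_cons, List.foldl_nil]
      have h1 : PySem.List.pyGetD tmp (k : Int) 0 = tmp[k] := by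
        rw [PySem.List.pyGetD_natCast]
        exact List.getD_eq_getElem tmp 0 hklt
      have hidx : ((tmp.length : Int) - 1 - (k : Int)) = ((tmp.length - 1 - k : Nat) : Int) := by
        omega
      have hlt2 : tmp.length - 1 - k < tmp.length := by omega
      have h2 : PySem.List.pyGetD tmp ((tmp.length : Int) - 1 - (k : Int)) 0
          = tmp[tmp.length - 1 - k] := by
        rw [hidx, PySem.List.pyGetD_natCast]
        exact List.getD_eq_getElem tmp 0 hlt2
      rw [h1, h2]
      refine Prod.ext ?_ ?_
      · simp only
        rw [List.append_assoc]
        congr 1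
        rw [List.take_add_one, List.getElem?_eq_getElem hklt]
        simp
      · simp only
        have hd : tmp.drop (tmp.length - (k + 1))
            = tmp[tmp.length - 1 - k] :: tmp.drop (tmp.length - k) := by
          have h3 : tmp.length - (k + 1) < tmp.length := by omega
          rw [List.drop_eq_getElem_cons h3]
          congr 2 <;> omega
        rw [hd, List.cons_append]
  have := key tmp.length le_rfl
  simpa using this

-- the outer loop, once each step is known to append block i right and prepend it left
theorem outer_loop_eq (B : Int → List Int) (f : List Int × List Int → Int → List Int × List Int)
    (l : List Int) (hf : ∀ i ∈ l, ∀ st, f st i = (st.1 ++ B i, B i ++ st.2)) (r rr : List Int) :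
    l.foldl f (r, rr) = (r ++ (l.map B).flatten, (l.map B).reverse.flatten ++ rr) := by
  induction l generalizing r rr with
  | nil => simp
  | cons x xs ih =>
    simp only [List.foldl_cons]
    rw [hf x (List.mem_cons_self) (r, rr),
        ih (fun i hi st => hf i (List.mem_cons_of_mem _ hi) st)]
    simp [List.append_assoc]

-- A's per-iteration tmp (with the trailing 0) is exactly B's block, for i in the loop range
theorem tmp_eq_block (gradient : List Int) (i : Int) (h0 : 0 ≤ i)
    (h1 : i < (gradient.length : Int) - 1) :
    (if i = 0 then [PySem.List.pyGetD gradient 0 0]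
     else if i = 1 then
       [PySem.List.pyGetD gradient 1 0, PySem.List.pyGetD gradient 0 0]
     else if i < (gradient.length : Int) - 1 then
       ((PySem.List.pyRange 0 (i - 1) 1).foldl
          (fun t _ => t ++ [PySem.List.pyGetD gradient i 0])
          [PySem.List.pyGetD gradient (i + 1) 0]) ++
         [PySem.List.pyGetD gradient (i - 1) 0]
     else []) ++ [0] = bumpLayerBlock gradient i := by
  unfold bumpLayerBlock
  by_cases hi0 : i = 0
  · norm_num [hi0]
  · by_cases hi1 : i = 1
    · norm_num [hi1]
    · have h2 : 2 ≤ i := by omega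
      rw [if_neg hi0, if_neg hi1, if_pos h1, if_pos h2, if_pos (by omega : 1 ≤ i)]
      rw [foldl_append_const, PySem.List.length_pyRange_one]
      simp [List.append_assoc]

-- B's recursion unfolds to: blocks i..i+k-1, then the middle, then the same blocks backwards.
theorem bumpLayer_eq (gradient : List Int) (n : Int) :
    ∀ (k : Nat) (i : Int),
      bumpLayer gradient n i k
        = (((List.range k).map (fun j : Nat => bumpLayerBlock gradient (i + (j : Int)))).flatten)
            ++ ([PySem.List.pyGetD gradient (-2) 0]
                 ++ List.replicate n.toNat (PySem.List.pyGetD gradient (-1) 0) ++ [0])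
            ++ (((List.range k).map (fun j : Nat => bumpLayerBlock gradient (i + (j : Int)))).reverse.flatten) := by
  intro k
  induction k with
  | zero => intro i; simp [bumpLayer]
  | succ k ih =>
    intro i
    have hstep : bumpLayer gradient n i (k + 1)
        = bumpLayerBlock gradient i ++ bumpLayer gradient n (i + 1) k
            ++ bumpLayerBlock gradient i := rfl
    have hfun : (fun j : Nat => bumpLayerBlock gradient (i + 1 + (j : Int)))
        = (fun j : Nat => bumpLayerBlock gradient (i + (j : Int))) ∘ Nat.succ := by
      funext a
      simp only [Function.comp_apply]
      congr 1
      push_cast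
      ring
    rw [hstep, ih (i + 1), List.range_succ_eq_map, List.map_cons, List.map_map, hfun]
    simp [List.append_assoc]

theorem build_bumped_eq (gradient : List Int) (_h : Pre_build_bumped gradient) :
    build_bumped gradient = build_bumped_alt gradient := by
  unfold build_bumped build_bumped_alt
  simp only []
  rw [outer_loop_eq (bumpLayerBlock gradient)
        _ _
        (by
          intro i hi st
          have hmem := (PySem.List.mem_pyRange_one).mp hi
          rw [← tmp_eq_block gradient i hmem.1 hmem.2]
          rw [inner_loop_eq])]
  rw [foldl_append_const, PySem.List.length_pyRange_one]
  rw [bumpLayer_eq]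
  have h : (PySem.List.pyRange 0 ((gradient.length : Int) - 1) 1).map (bumpLayerBlock gradient)
      = (List.range ((gradient.length : Int) - 1).toNat).map
          (fun j : Nat => bumpLayerBlock gradient (0 + (j : Int))) := by
    rw [PySem.List.pyRange_one, List.map_map]
    simp [Function.comp]
  rw [h]
  simp [List.append_assoc]

-- ===== VERDICT (by name: the statement is the Claim_ definition above) =====
theorem build_bumped_spec : Claim_equal_build_bumped := by
  intro gradient _ hpre
  unfold Spec_build_bumped
  exact build_bumped_eq gradient hpre
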